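-- pv_equiv track=rewrite | github.com/seunggi-lee/Using_Python | 스킬트리.py | solution
-- ===== SOURCE A (Python) =====
-- def solution(skill, skill_trees):
--     answer = 0
--
--     for i in range(len(skill_trees)):
--         temp = ""
--         for j in range(len(skill_trees[i])):
--             if skill_trees[i][j] in skill:
--                 temp += skill_trees[i][j]
--         if temp == skill[:len(temp)]:
--             answer += 1
--
--     return answer
-- ===== SOURCE B (Python) =====
-- def solution(skill, skill_trees):
--     answer = 0
--     for tree in skill_trees:
--         p = 0
--         valid = True
--         for c in tree:
--             if c in skill:
--                 if p == len(skill) or c != skill[p]: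
--                     valid = False
--                     break
--                 p += 1
--         if valid:
--             answer += 1
--     return answer
-- ===== Notes on version B (the rewrite author's own statement) =====
-- stated objective: simpler
-- what changed: Replaces A's build-a-filtered-temp-string-then-compare-with-a-prefix-slice (per tree: collect all skill letters into temp, then test temp == skill[:len(temp)]) by a one-pass incremental match: a pointer into skill advances as skill letters are met and the scan breaks on the first mismatch, so no temp string is built and invalid trees are abandoned early (measured ~2.8x at the largest timing size).
import Mathlib
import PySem

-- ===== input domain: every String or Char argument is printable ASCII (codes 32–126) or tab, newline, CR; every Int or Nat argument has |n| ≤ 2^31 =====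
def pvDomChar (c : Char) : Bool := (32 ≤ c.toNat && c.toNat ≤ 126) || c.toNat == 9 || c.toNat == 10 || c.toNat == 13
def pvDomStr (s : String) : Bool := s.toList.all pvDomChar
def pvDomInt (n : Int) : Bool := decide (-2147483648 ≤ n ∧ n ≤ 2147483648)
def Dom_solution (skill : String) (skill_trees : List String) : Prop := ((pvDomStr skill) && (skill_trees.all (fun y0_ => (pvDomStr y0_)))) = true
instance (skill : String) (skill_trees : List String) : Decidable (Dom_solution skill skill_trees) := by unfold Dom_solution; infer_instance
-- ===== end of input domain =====

-- B is a one-pass pointer match per tree instead of A's filter-then-prefix-slice compare; objective: simpler.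

-- ===== PORT A =====
-- 'skill_trees[i][j] in skill' tests a 1-char substring; exact as char membership in skill's chars.
def aTemp (skill tree : List Char) : List Char :=
  (PySem.List.pyRange 0 (tree.length : Int) 1).foldl (fun temp j =>
    if PySem.List.pyGetD tree j ' ' ∈ skill then temp ++ [PySem.List.pyGetD tree j ' '] else temp) []

def solution (skill : String) (skill_trees : List String) : Int :=
  (PySem.List.pyRange 0 (skill_trees.length : Int) 1).foldl (fun answer i =>
    if aTemp skill.toList (PySem.List.pyGetD skill_trees i "").toList
        = PySem.List.slice skill.toList none
            (some ((aTemp skill.toList (PySem.List.pyGetD skill_trees i "").toList).length : Int))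
    then answer + 1 else answer) 0

-- ===== PORT B =====
-- per-tree scan with pointer p into skill; returns whether the tree stays valid (Source B's inner loop with break)
def altValid (skill : List Char) : List Char → Nat → Bool
  | [], _ => true
  | c :: rest, p =>
    if c ∈ skill then
      if p = skill.length ∨ (some c ≠ skill[p]?) then false
      else altValid skill rest (p + 1)
    else altValid skill rest p

def solution_alt (skill : String) (skill_trees : List String) : Int :=
  skill_trees.foldl (fun answer tree =>
    if altValid skill.toList tree.toList 0 then answer + 1 else answer) 0

-- ===== PRECONDITION & SPEC =====
def Spec_solution (skill : String) (skill_trees : List String) (out : Int) : Prop := out = solution_alt skill skill_trees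
instance (skill : String) (skill_trees : List String) (out : Int) : Decidable (Spec_solution skill skill_trees out) := by unfold Spec_solution; infer_instance

-- ===== CLAIM (what is proved, stated in full; the proofs are below) =====
def Claim_equal_solution : Prop := ∀ (skill : String) (skill_trees : List String), Dom_solution skill skill_trees → Spec_solution skill skill_trees (solution skill skill_trees)

-- ===== LEMMAS AND PROOFS =====

-- A's inner loop builds the filter of the tree's chars
lemma aTemp_eq_filter (skill tree : List Char) :
    aTemp skill tree = tree.filter (· ∈ skill) := by
  unfold aTemp
  rw [PySem.List.foldl_pyRange_zero_pyGetD' tree ' '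
      (fun temp c => if c ∈ skill then temp ++ [c] else temp) []]
  induction tree using List.reverseRecOn with
  | nil => simp
  | append_singleton xs x ih =>
    simp only [List.foldl_append, List.foldl_cons, List.foldl_nil, List.filter_append, ih]
    split <;> simp_all

-- B's pointer scan decides exactly A's prefix condition
lemma altValid_iff (skill : List Char) (chars : List Char) (p : Nat) :
    altValid skill chars p = true ↔
      chars.filter (· ∈ skill) = (skill.drop p).take (chars.filter (· ∈ skill)).length := by
  induction chars generalizing p with
  | nil => simp [altValid]
  | cons c rest ih =>
    by_cases hc : c ∈ skill
    · simp only [altValid, List.filter_cons, hc, decide_true, if_pos]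
      by_cases hp : p < skill.length
      · have hget : skill[p]? = some skill[p] := List.getElem?_eq_getElem hp
        have hdrop : skill.drop p = skill[p] :: skill.drop (p + 1) :=
          List.drop_eq_getElem_cons hp
        by_cases hcd : c = skill[p]
        · have hng : ¬ (p = skill.length ∨ (some c ≠ skill[p]?)) := by
            simp [hget, hcd]; omega
          rw [if_neg hng, ih, hdrop, List.length_cons, List.take_succ_cons, hcd]
          exact ⟨fun h => by rw [← h], fun h => (List.cons_eq_cons.mp h).2⟩
        · have hg : (p = skill.length ∨ (some c ≠ skill[p]?)) := by
            right; simp [hget, hcd]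
          rw [if_pos hg, hdrop, List.length_cons, List.take_succ_cons]
          exact (iff_of_false (by simp) (fun h => hcd (List.cons_eq_cons.mp h).1)).symm.symm
      · have hg : (p = skill.length ∨ (some c ≠ skill[p]?)) := by
          rcases (by omega : p = skill.length ∨ skill.length < p) with h | h
          · exact Or.inl h
          · right; simp [List.getElem?_eq_none (by omega : skill.length ≤ p)]
        rw [if_pos hg]
        have hd : skill.drop p = [] := List.drop_eq_nil_of_le (by omega)
        simp [hd]
    · simp only [altValid, List.filter_cons, hc, decide_false]
      simpa using ih p

theorem solution_spec : Claim_equal_solution := by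
  intro skill skill_trees _
  unfold Spec_solution solution solution_alt
  rw [PySem.List.foldl_pyRange_zero_pyGetD' skill_trees ""
      (fun answer tree =>
        if aTemp skill.toList tree.toList
            = PySem.List.slice skill.toList none
                (some ((aTemp skill.toList tree.toList).length : Int))
        then answer + 1 else answer) 0]
  apply PySem.List.foldl_congr_mem
  intro answer tree _
  have h : (aTemp skill.toList tree.toList
      = PySem.List.slice skill.toList none
          (some ((aTemp skill.toList tree.toList).length : Int)))
      ↔ altValid skill.toList tree.toList 0 = true := by
    rw [aTemp_eq_filter, PySem.List.slice_to_natCast, altValid_iff]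
    simp
  by_cases hb : altValid skill.toList tree.toList 0 = true
  · rw [if_pos (h.mpr hb), if_pos hb]
  · rw [if_neg (fun hc => hb (h.mp hc)), if_neg hb]
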